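-- pv_equiv track=rewrite | github.com/Ahannila/Algos | viikko3/samechar.py | count
-- ===== SOURCE A (Python) =====
-- def count(s):
--     result = 0
--     counter = 0
--     for i in range(len(s)):
--         if i > 0 and s[i-1] != s[i]:
--             counter = 0
--         counter += 1
--         result += counter
--     return result
-- ===== SOURCE B (Python) =====
-- from itertools import groupby
--
-- def count(s):
--     total = 0
--     for _, g in groupby(s):
--         L = sum(1 for _ in g)
--         total += L * (L + 1) // 2
--     return total
-- ===== Notes on version B (the rewrite author's own statement) =====
-- stated objective: simpler
-- what changed: Replaces the per-index running-counter accumulation with itertools.groupby: split the string into maximal runs of equal characters and add L*(L+1)//2 per run.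
import Mathlib
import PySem

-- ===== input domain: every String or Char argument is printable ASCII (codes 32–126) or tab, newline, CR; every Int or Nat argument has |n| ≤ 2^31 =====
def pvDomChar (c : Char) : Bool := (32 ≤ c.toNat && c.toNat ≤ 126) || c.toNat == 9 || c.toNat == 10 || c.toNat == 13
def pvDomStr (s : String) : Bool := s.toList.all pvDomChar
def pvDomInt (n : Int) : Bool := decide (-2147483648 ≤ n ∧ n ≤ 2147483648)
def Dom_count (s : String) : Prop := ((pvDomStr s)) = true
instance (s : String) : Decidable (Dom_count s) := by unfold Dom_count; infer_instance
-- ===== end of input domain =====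

-- B replaces A's per-index running counter by grouping the string into maximal runs and adding L*(L+1)/2 per run (simpler decomposition, same cost).

-- ===== PORT A =====
def count (s : String) : Int :=
  let cs := s.toList
  let st := (PySem.List.pyRange 0 (cs.length : Int) 1).foldl
    (fun (rc : Int × Int) (i : Int) =>
      let counter : Int := if 0 < i ∧ PySem.List.pyGet? cs (i-1) ≠ PySem.List.pyGet? cs i then 0 else rc.2
      let counter := counter + 1
      (rc.1 + counter, counter)) ((0 : Int), (0 : Int))
  st.1

-- ===== PORT B =====
-- groupby: maximal runs of equal characters, as run lengths (hand-rolled port of itertools.groupby over a string)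
def runsAux : Char → Nat → List Char → List Nat
  | _, n, [] => [n]
  | c, n, d :: rest => if d = c then runsAux c (n+1) rest else n :: runsAux d 1 rest

def runLengths : List Char → List Nat
  | [] => []
  | c :: rest => runsAux c 1 rest

def count_alt (s : String) : Int :=
  ((runLengths s.toList).map (fun (L : Nat) => ((L : Int) * ((L : Int) + 1)) / 2)).sum

-- ===== PRECONDITION & SPEC =====
def Spec_count (s : String) (out : Int) : Prop := out = count_alt s
instance (s : String) (out : Int) : Decidable (Spec_count s out) := by unfold Spec_count; infer_instance

-- ===== CLAIM (what is proved, stated in full; the proofs are below) =====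
def Claim_equal_count : Prop := ∀ (s : String), Dom_count s → Spec_count s (count s)

-- ===== LEMMAS AND PROOFS =====

-- reference recursion: sum of the running counter, given the previous char and current counter
def runsum : Option Char → Int → List Char → Int
  | _, _, [] => 0
  | prev, c, d :: rest =>
    let k : Int := match prev with
      | none => c + 1
      | some e => if e = d then c + 1 else 1
    k + runsum (some d) k rest

def tri (n : Nat) : Int := ((n : Int) * ((n : Int) + 1)) / 2

theorem tri_succ (n : Nat) : tri (n + 1) = tri n + (n + 1 : Int) := by
  unfold tri
  push_cast
  have h : ((n : Int) + 1) * ((n : Int) + 1 + 1) = (n : Int) * ((n : Int) + 1) + 2 * ((n : Int) + 1) := by ring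
  rw [h]
  omega

theorem runsum_eq_runsAux (t : List Char) : ∀ (c : Char) (n : Nat),
    runsum (some c) (n : Int) t + tri n = ((runsAux c n t).map tri).sum := by
  induction t with
  | nil => intro c n; simp [runsum, runsAux]
  | cons d rest ih =>
    intro c n
    by_cases h : d = c
    · subst h
      simp only [runsum, runsAux]
      have := ih d (n + 1)
      push_cast at this ⊢
      rw [tri_succ] at this
      linarith [this]
    · have hne : c ≠ d := fun hh => h hh.symm
      simp only [runsum, runsAux, if_neg h, if_neg hne, List.map_cons, List.sum_cons]
      have := ih d 1
      have h1 : tri 1 = 1 := by decide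
      push_cast at this
      rw [h1] at this
      linarith [this]

-- A's fold over indices [p.length, (p++t).length) equals runsum on the suffix t
theorem foldA (t : List Char) : ∀ (p : List Char) (r c : Int),
    ((PySem.List.pyRange (p.length : Int) ((p.length + t.length : Nat) : Int) 1).foldl
      (fun (rc : Int × Int) (i : Int) =>
        let counter : Int := if 0 < i ∧ PySem.List.pyGet? (p ++ t) (i-1) ≠ PySem.List.pyGet? (p ++ t) i then 0 else rc.2
        let counter := counter + 1
        (rc.1 + counter, counter)) (r, c)).1
    = r + runsum p.getLast? c t := by
  induction t with
  | nil =>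
    intro p r c
    simp [runsum]
  | cons d rest ih =>
    intro p r c
    have hcons : PySem.List.pyRange (p.length : Int) ((p.length + (d :: rest).length : Nat) : Int) 1
        = (p.length : Int) :: PySem.List.pyRange ((p.length : Int) + 1) ((p.length + (d :: rest).length : Nat) : Int) 1 := by
      apply PySem.List.pyRange_one_cons
      push_cast [List.length_cons]
      omega
    have key : ∀ (r' c' : Int),
        ((PySem.List.pyRange ((p.length : Int) + 1) ((p.length + (d :: rest).length : Nat) : Int) 1).foldl
          (fun (rc : Int × Int) (i : Int) =>
            let counter : Int := if 0 < i ∧ PySem.List.pyGet? (p ++ d :: rest) (i-1) ≠ PySem.List.pyGet? (p ++ d :: rest) i then 0 else rc.2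
            let counter := counter + 1
            (rc.1 + counter, counter)) (r', c')).1
        = r' + runsum (some d) c' rest := by
      intro r' c'
      have h := ih (p ++ [d]) r' c'
      have hl : (p ++ [d]).getLast? = some d := by simp
      rw [hl] at h
      have e1 : (((p ++ [d]).length : Nat) : Int) = (p.length : Int) + 1 := by
        simp
      have e2 : (((p ++ [d]).length + rest.length : Nat) : Int) = ((p.length + (d :: rest).length : Nat) : Int) := by
        simp [List.length_append]
        ring
      rw [e1, e2, List.append_assoc, List.singleton_append] at h
      exact h
    rw [hcons]
    simp only [List.foldl_cons]
    rw [key]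
    -- it remains to relate the first step's counter to runsum's head step
    have hget : PySem.List.pyGet? (p ++ d :: rest) ((p.length : Int)) = some d :=
      PySem.List.pyGet?_append_length p rest d
    cases hp : p.getLast? with
    | none =>
      have hnil : p = [] := List.getLast?_eq_none_iff.mp hp
      subst hnil
      simp [runsum]
      ring
    | some e =>
      have hpne : p ≠ [] := by intro hnil; subst hnil; simp at hp
      have hplen : 0 < p.length := List.length_pos_of_ne_nil hpne
      have hpos : (0 : Int) < (p.length : Int) := by exact_mod_cast hplen
      have hprev : PySem.List.pyGet? (p ++ d :: rest) ((p.length : Int) - 1) = some e := by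
        have hn : ((p.length : Int) - 1) = ((p.length - 1 : Nat) : Int) := by omega
        rw [hn, PySem.List.pyGet?_natCast]
        rw [List.getElem?_append_left (by omega : p.length - 1 < p.length)]
        rw [← List.getLast?_eq_getElem?]
        exact hp
      by_cases hed : e = d
      · subst hed
        simp [runsum, hprev]
        ring
      · have hne : (some e : Option Char) ≠ some d := by simp [hed]
        simp only [runsum, hprev, hget]
        rw [if_pos ⟨hpos, hne⟩, if_neg hed]
        ring_nf

theorem count_eq_runsum (s : String) : count s = runsum none 0 s.toList := by
  have := foldA s.toList [] 0 0
  simpa [count] using this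

theorem count_alt_eq (s : String) : count_alt s = ((runLengths s.toList).map tri).sum := by
  unfold count_alt tri
  rfl

theorem runsum_none (cs : List Char) : runsum none 0 cs = ((runLengths cs).map tri).sum := by
  cases cs with
  | nil => simp [runsum, runLengths]
  | cons c rest =>
    have h := runsum_eq_runsAux rest c 1
    have h1 : tri 1 = 1 := by decide
    rw [h1] at h
    norm_num at h
    simp only [runsum, runLengths]
    norm_num
    linarith [h]

-- ===== VERDICT (by name: the statement is the Claim_ definition above) =====
theorem count_spec : Claim_equal_count := by
  intro s _
  show count s = count_alt s
  rw [count_eq_runsum, count_alt_eq, runsum_none]
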